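-- pv_equiv track=rewrite | github.com/raya0xyz/BurpExtension | cash-poison.py | generate_cyclic_pattern
-- ===== SOURCE A (Python) =====
-- def generate_cyclic_pattern(length):
--         charset = "ABCDEFGHIJKLMNOPQRSTUVWXYZ"
--         pattern = ""
--         for a in charset:
--             for b in charset.lower():
--                 for c in "0123456789":
--                     if len(pattern) >= length:
--                         return pattern[:length]
--                     pattern += a + b + c
--         return pattern[:length]
-- ===== SOURCE B (Python) =====
-- def generate_cyclic_pattern(length):
--     upper = "ABCDEFGHIJKLMNOPQRSTUVWXYZ"
--     lower = upper.lower()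
--     digits = "0123456789"
--
--     def char_at(i):
--         n = i // 3
--         r = i % 3
--         if r == 0:
--             return upper[n // 260]
--         if r == 1:
--             return lower[(n // 10) % 26]
--         return digits[n % 10]
--
--     return "".join(char_at(i) for i in range(min(length, 20280)))
-- ===== Notes on version B (the rewrite author's own statement) =====
-- stated objective: alternative
-- what changed: B computes each output character directly by index arithmetic (i//3 selects the chunk, divisors 260/10%26/%10 decode its letters/digit) over range(min(length,20280)), instead of A's three nested loops that grow a pattern string chunk by chunk with an early return.
import Mathlib
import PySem

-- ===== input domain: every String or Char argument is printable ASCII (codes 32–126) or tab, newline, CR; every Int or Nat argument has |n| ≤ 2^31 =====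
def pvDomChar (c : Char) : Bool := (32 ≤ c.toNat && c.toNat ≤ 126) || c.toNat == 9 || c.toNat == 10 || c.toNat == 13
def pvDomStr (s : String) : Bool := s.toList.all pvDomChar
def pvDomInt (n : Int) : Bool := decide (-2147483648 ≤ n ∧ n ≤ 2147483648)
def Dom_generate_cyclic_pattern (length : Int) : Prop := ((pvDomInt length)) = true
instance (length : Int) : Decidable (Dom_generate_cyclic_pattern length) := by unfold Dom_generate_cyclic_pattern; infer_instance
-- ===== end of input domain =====

-- B replaces A's nested chunk-building loops with direct per-index arithmetic decoding; same cost, different algorithm.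

-- ===== PORT A =====
-- A's early 'return' is modelled with Except: .error carries the returned value past the remaining iterations.
def pvStepA (length : Int) (st : Except (List Char) (List Char)) (chunk : List Char) :
    Except (List Char) (List Char) :=
  match st with
  | .error s => .error s
  | .ok pattern =>
    if length ≤ (pattern.length : Int) then
      .error (PySem.Chars.slice pattern none (some length))
    else
      .ok (pattern ++ chunk)

-- the final step: either the early-returned value, or the trailing 'return pattern[:length]'
def pvFinishA (length : Int) : Except (List Char) (List Char) → String
  | .error s => String.ofList s
  | .ok pattern => String.ofList (PySem.Chars.slice pattern none (some length))

-- charset = "ABCDEFGHIJKLMNOPQRSTUVWXYZ" (inlined at each use)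
def generate_cyclic_pattern (length : Int) : String :=
  pvFinishA length ("ABCDEFGHIJKLMNOPQRSTUVWXYZ".toList.foldl (fun st a =>
      (PySem.Chars.lower "ABCDEFGHIJKLMNOPQRSTUVWXYZ".toList).foldl (fun st b =>
        "0123456789".toList.foldl (fun st c => pvStepA length st [a, b, c]) st) st)
    (Except.ok ([] : List Char)))

-- ===== PORT B =====
-- char_at from Source B: one character (a singleton string) per index, decoded by arithmetic.
def pvCharAt (i : Int) : List Char :=
  let upper := "ABCDEFGHIJKLMNOPQRSTUVWXYZ".toList
  let lower := PySem.Chars.lower upper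
  let digits := "0123456789".toList
  let n := PySem.Int.floordiv i 3
  let r := PySem.Int.mod i 3
  if r = 0 then [PySem.List.pyGetD upper (PySem.Int.floordiv n 260) 'A']
  else if r = 1 then [PySem.List.pyGetD lower (PySem.Int.mod (PySem.Int.floordiv n 10) 26) 'a']
  else [PySem.List.pyGetD digits (PySem.Int.mod n 10) '0']

def generate_cyclic_pattern_alt (length : Int) : String :=
  String.ofList
    (PySem.Chars.join [] ((PySem.List.pyRange 0 (min length 20280) 1).map pvCharAt))

-- ===== PRECONDITION & SPEC =====
def Spec_generate_cyclic_pattern (length : Int) (out : String) : Prop := out = generate_cyclic_pattern_alt length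
instance (length : Int) (out : String) : Decidable (Spec_generate_cyclic_pattern length out) := by unfold Spec_generate_cyclic_pattern; infer_instance

-- ===== CLAIM (what is proved, stated in full; the proofs are below) =====
def Claim_equal_generate_cyclic_pattern : Prop := ∀ (length : Int), Dom_generate_cyclic_pattern length → Spec_generate_cyclic_pattern length (generate_cyclic_pattern length)

-- ===== LEMMAS AND PROOFS =====

-- the list of 3-char chunks A appends, in order
def pvChunks : List (List Char) :=
  "ABCDEFGHIJKLMNOPQRSTUVWXYZ".toList.flatMap (fun a =>
    (PySem.Chars.lower "ABCDEFGHIJKLMNOPQRSTUVWXYZ".toList).flatMap (fun b =>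
      "0123456789".toList.map (fun c => [a, b, c])))

-- the full 20280-char pattern
def pvFull : List Char := pvChunks.flatten

lemma upper_len : "ABCDEFGHIJKLMNOPQRSTUVWXYZ".toList.length = 26 := rfl

lemma digits_len : "0123456789".toList.length = 10 := rfl

lemma lower_len : (PySem.Chars.lower "ABCDEFGHIJKLMNOPQRSTUVWXYZ".toList).length = 26 := by
  simp [PySem.Chars.lower]

-- error propagates through the rest of the loop
lemma foldl_stepA_error (length : Int) (cs : List (List Char)) (s : List Char) :
    cs.foldl (pvStepA length) (.error s) = .error s := by
  induction cs with
  | nil => rfl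
  | cons ch cs ih => simpa [pvStepA] using ih

def pvExtract (length : Int) : Except (List Char) (List Char) → List Char
  | .error s => s
  | .ok pattern => PySem.Chars.slice pattern none (some length)

-- loop invariant: the result is the length-slice of the fully extended pattern
lemma loop_inv (length : Int) (h : 0 < length) :
    ∀ (cs : List (List Char)) (p : List Char),
      pvExtract length (cs.foldl (pvStepA length) (.ok p)) =
        (p ++ cs.flatten).take length.toNat := by
  intro cs
  induction cs with
  | nil =>
    intro p
    simp only [List.foldl_nil, pvExtract, PySem.Chars.slice_eq_listSlice, List.flatten_nil,
      List.append_nil]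
    rw [PySem.List.slice_to p (le_of_lt h)]
  | cons ch cs ih =>
    intro p
    by_cases hle : length ≤ (p.length : Int)
    · have h1 : (ch :: cs).foldl (pvStepA length) (.ok p)
          = .error (PySem.Chars.slice p none (some length)) := by
        simp [List.foldl_cons, pvStepA, hle, foldl_stepA_error]
      rw [h1]
      have hn : length.toNat ≤ p.length := by omega
      simp only [pvExtract, PySem.Chars.slice_eq_listSlice]
      rw [PySem.List.slice_to p (le_of_lt h), List.take_append_of_le_length hn]
    · have h1 : (ch :: cs).foldl (pvStepA length) (.ok p)
          = cs.foldl (pvStepA length) (.ok (p ++ ch)) := by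
        simp [List.foldl_cons, pvStepA, hle]
      rw [h1, ih (p ++ ch)]
      simp [List.append_assoc]

-- when length ≤ 0 the very first check fires
lemma foldl_stepA_nonpos (length : Int) (h : length ≤ 0) (cs : List (List Char)) (hcs : cs ≠ []) :
    cs.foldl (pvStepA length) (.ok ([] : List Char))
      = .error (PySem.Chars.slice [] none (some length)) := by
  cases cs with
  | nil => exact absurd rfl hcs
  | cons ch cs =>
    simp only [List.foldl_cons, pvStepA]
    rw [if_pos (by simp; omega)]
    exact foldl_stepA_error length cs _

-- A's triple nested loop is the single loop over pvChunks
lemma a_loop_eq (length : Int) :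
    ("ABCDEFGHIJKLMNOPQRSTUVWXYZ".toList.foldl (fun st a =>
        (PySem.Chars.lower "ABCDEFGHIJKLMNOPQRSTUVWXYZ".toList).foldl (fun st b =>
          "0123456789".toList.foldl (fun st c => pvStepA length st [a, b, c]) st) st)
      (Except.ok ([] : List Char)))
    = pvChunks.foldl (pvStepA length) (.ok []) := by
  rw [pvChunks]
  simp only [List.foldl_flatMap, List.foldl_map]

-- a flatMap whose pieces all have length L: its length, and its entries
lemma length_flatMap_const {α γ : Type} (g : α → List γ) (L : Nat)
    (xs : List α) (hg : ∀ a ∈ xs, (g a).length = L) :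
    (xs.flatMap g).length = xs.length * L := by
  induction xs with
  | nil => simp
  | cons x xs ih =>
    simp only [List.flatMap_cons, List.length_append, List.length_cons]
    rw [hg x (by simp), ih (fun a ha => hg a (by simp [ha]))]
    ring

lemma getD_flatMap_const {α γ : Type} [Inhabited α] (g : α → List γ) (L : Nat) (hL : 0 < L)
    (d : γ) : ∀ (xs : List α) (n : Nat), (∀ a ∈ xs, (g a).length = L) → n < xs.length * L →
    (xs.flatMap g).getD n d = (g (xs.getD (n / L) default)).getD (n % L) d := by
  intro xs
  induction xs with
  | nil => intro n _ hn; simp at hn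
  | cons x xs ih =>
    intro n hg hn
    have hx : (g x).length = L := hg x (by simp)
    rw [List.flatMap_cons]
    by_cases h : n < L
    · rw [List.getD_append _ _ _ _ (by omega), Nat.div_eq_of_lt h, Nat.mod_eq_of_lt h,
        List.getD_cons_zero]
    · rw [List.getD_append_right _ _ _ _ (by omega), hx]
      have hdiv : n / L = (n - L) / L + 1 := by
        conv_lhs => rw [show n = (n - L) + L by omega]
        exact Nat.add_div_right _ hL
      have hmod : n % L = (n - L) % L := Nat.mod_eq_sub_mod (by omega)
      rw [hdiv, hmod, List.getD_cons_succ]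
      have hbound : n - L < xs.length * L := by
        have hn' : n < xs.length * L + L := by
          have := hn
          rw [List.length_cons, Nat.succ_mul] at this
          omega
        omega
      exact ih (n - L) (fun a ha => hg a (by simp [ha])) hbound

lemma getD_map_lt {α β : Type} (f : α → β) (l : List α) (k : Nat) (hk : k < l.length)
    (d : β) (d' : α) : (l.map f).getD k d = f (l.getD k d') := by
  rw [List.getD_eq_getElem _ _ (by simpa using hk), List.getD_eq_getElem _ _ hk,
    List.getElem_map]

lemma pvChunks_mem_length : ∀ ch ∈ pvChunks, ch.length = 3 := by
  intro ch hch
  simp only [pvChunks, List.mem_flatMap, List.mem_map] at hch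
  obtain ⟨a, -, b, -, c, -, hc⟩ := hch
  rw [← hc]
  rfl

lemma pvInner_len (a : Char) :
    ((PySem.Chars.lower "ABCDEFGHIJKLMNOPQRSTUVWXYZ".toList).flatMap (fun b =>
      "0123456789".toList.map (fun c => [a, b, c]))).length = 260 := by
  rw [length_flatMap_const _ 10 _ (fun b _ => by simp), lower_len]

lemma pvChunks_length : pvChunks.length = 6760 := by
  rw [pvChunks, length_flatMap_const _ 260 _ (fun a _ => pvInner_len a), upper_len]

lemma pvChunks_getD (n : Nat) (hn : n < 6760) :
    pvChunks.getD n []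
      = ["ABCDEFGHIJKLMNOPQRSTUVWXYZ".toList.getD (n / 260) 'A',
         (PySem.Chars.lower "ABCDEFGHIJKLMNOPQRSTUVWXYZ".toList).getD (n % 260 / 10) 'a',
         "0123456789".toList.getD (n % 260 % 10) '0'] := by
  rw [pvChunks,
    getD_flatMap_const _ 260 (by norm_num) _ _ n (fun a _ => pvInner_len a)
      (by rw [upper_len]; omega),
    getD_flatMap_const _ 10 (by norm_num) _ _ (n % 260)
      (fun b _ => by simp)
      (by rw [lower_len]; omega),
    getD_map_lt _ _ _ (by rw [digits_len]; omega) _ '0']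
  have h1 : n / 260 < 26 := by omega
  have h2 : n % 260 / 10 < 26 := by omega
  have hfst : "ABCDEFGHIJKLMNOPQRSTUVWXYZ".toList.getD (n / 260) default
      = "ABCDEFGHIJKLMNOPQRSTUVWXYZ".toList.getD (n / 260) 'A' := by
    rw [List.getD_eq_getElem _ _ (by rw [upper_len]; omega),
      List.getD_eq_getElem _ _ (by rw [upper_len]; omega)]
  have hmid : (PySem.Chars.lower "ABCDEFGHIJKLMNOPQRSTUVWXYZ".toList).getD (n % 260 / 10) default
      = (PySem.Chars.lower "ABCDEFGHIJKLMNOPQRSTUVWXYZ".toList).getD (n % 260 / 10) 'a' := by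
    rw [List.getD_eq_getElem _ _ (by rw [lower_len]; omega),
      List.getD_eq_getElem _ _ (by rw [lower_len]; omega)]
  rw [hfst, hmid]

lemma pvFull_length : pvFull.length = 20280 := by
  rw [pvFull, ← List.flatMap_id,
    length_flatMap_const id 3 _ (fun ch hch => pvChunks_mem_length ch hch), pvChunks_length]

-- indexing a flatten of 3-char chunks
lemma getElem_flatten_three (cs : List (List Char)) (hlen : ∀ ch ∈ cs, ch.length = 3)
    (n r : Nat) (hr : r < 3) (hn : n < cs.length) :
    cs.flatten.getD (3 * n + r) 'A' = (cs.getD n []).getD r 'A' := by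
  induction cs generalizing n with
  | nil => simp at hn
  | cons ch cs ih =>
    have hch : ch.length = 3 := hlen ch (by simp)
    cases n with
    | zero =>
      have hrch : r < ch.length := by omega
      simp [List.getD, List.getElem?_append_left hrch]
    | succ n =>
      have h3 : 3 * (n + 1) + r = ch.length + (3 * n + r) := by omega
      rw [List.flatten_cons]
      have hstep : (ch ++ cs.flatten).getD (3 * (n + 1) + r) 'A'
          = cs.flatten.getD (3 * n + r) 'A' := by
        rw [h3]
        simp [List.getD, List.getElem?_append_right (Nat.le_add_right ch.length (3 * n + r))]
      rw [hstep, ih (fun c hc => hlen c (by simp [hc])) n (by simpa using hn)]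
      simp [List.getD]

-- characterisation of A
lemma a_eq (length : Int) :
    generate_cyclic_pattern length = String.ofList (pvFull.take length.toNat) := by
  unfold generate_cyclic_pattern
  rw [a_loop_eq length]
  by_cases h : 0 < length
  · have hinv := loop_inv length h pvChunks []
    rcases hr : pvChunks.foldl (pvStepA length) (Except.ok ([] : List Char)) with s | p
    · rw [hr] at hinv
      simp only [pvExtract, List.nil_append] at hinv
      simp only [pvFinishA, hinv]
      rfl
    · rw [hr] at hinv
      simp only [pvExtract, List.nil_append] at hinv
      simp only [pvFinishA, hinv]
      rfl
  · have hcs : pvChunks ≠ [] := by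
      intro hnil
      have hlen := pvChunks_length
      rw [hnil] at hlen
      simp at hlen
    rw [foldl_stepA_nonpos length (by omega) pvChunks hcs]
    have ht : length.toNat = 0 := by omega
    simp [pvFinishA, PySem.Chars.slice_eq_listSlice, PySem.List.slice, ht]

-- B's character function agrees with the full pattern at every valid index
lemma charAt_eq_full (k : Nat) (hk : k < 20280) :
    pvCharAt (k : Int) = [pvFull.getD k 'A'] := by
  have hn : k / 3 < 6760 := by omega
  have hget : pvFull.getD k 'A' = (pvChunks.getD (k / 3) []).getD (k % 3) 'A' := by
    rw [pvFull]
    have hdecomp : k = 3 * (k / 3) + k % 3 := by omega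
    conv_lhs => rw [hdecomp]
    exact getElem_flatten_three pvChunks pvChunks_mem_length (k / 3) (k % 3) (by omega)
      (by rw [pvChunks_length]; exact hn)
  rw [hget, pvChunks_getD (k / 3) hn]
  simp only [pvCharAt]
  have e1 : PySem.Int.mod (k : Int) 3 = ((k % 3 : Nat) : Int) := by
    exact_mod_cast PySem.Int.mod_natCast k 3
  have e2 : PySem.Int.floordiv (k : Int) 3 = ((k / 3 : Nat) : Int) := by
    exact_mod_cast PySem.Int.floordiv_natCast k 3
  rw [e1, e2]
  have e3 : PySem.Int.floordiv ((k / 3 : Nat) : Int) 260 = ((k / 3 / 260 : Nat) : Int) := by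
    exact_mod_cast PySem.Int.floordiv_natCast (k / 3) 260
  have e4 : PySem.Int.floordiv ((k / 3 : Nat) : Int) 10 = ((k / 3 / 10 : Nat) : Int) := by
    exact_mod_cast PySem.Int.floordiv_natCast (k / 3) 10
  rw [e3, e4]
  have e5 : PySem.Int.mod ((k / 3 / 10 : Nat) : Int) 26 = ((k / 3 / 10 % 26 : Nat) : Int) := by
    exact_mod_cast PySem.Int.mod_natCast (k / 3 / 10) 26
  have e6 : PySem.Int.mod ((k / 3 : Nat) : Int) 10 = ((k / 3 % 10 : Nat) : Int) := by
    exact_mod_cast PySem.Int.mod_natCast (k / 3) 10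
  rw [e5, e6, PySem.List.pyGetD_natCast, PySem.List.pyGetD_natCast, PySem.List.pyGetD_natCast]
  have hi1 : k / 3 % 260 / 10 = k / 3 / 10 % 26 := by omega
  have hi2 : k / 3 % 260 % 10 = k / 3 % 10 := by omega
  have hr : k % 3 = 0 ∨ k % 3 = 1 ∨ k % 3 = 2 := by omega
  rcases hr with h | h | h <;> simp [h, hi1, hi2]

-- characterisation of B
lemma b_eq (length : Int) :
    generate_cyclic_pattern_alt length
      = String.ofList (pvFull.take (min length 20280).toNat) := by
  unfold generate_cyclic_pattern_alt
  congr 1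
  set m : Int := min length 20280 with hm
  by_cases hpos : 0 < m
  · have hub : m.toNat ≤ 20280 := by omega
    have hrange : PySem.List.pyRange 0 m 1
        = (List.range m.toNat).map (fun k : Nat => (k : Int)) := by
      rw [PySem.List.pyRange_one]
      have h00 : (m - 0).toNat = m.toNat := by omega
      rw [h00]
      exact List.map_congr_left (fun k _ => by omega)
    rw [hrange, List.map_map]
    have hmap : (List.range m.toNat).map (pvCharAt ∘ fun k : Nat => (k : Int))
        = (List.range m.toNat).map (fun k => [pvFull.getD k 'A']) := by
      apply List.map_congr_left
      intro k hk
      simp only [List.mem_range] at hk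
      simpa [Function.comp] using charAt_eq_full k (by omega)
    rw [hmap]
    have htake : (List.range m.toNat).map (fun k => [pvFull.getD k 'A'])
        = (pvFull.take m.toNat).map (fun c => [c]) := by
      apply List.ext_getElem
      · simp [pvFull_length]
        omega
      · intro i h1 h2
        simp only [List.getElem_map, List.getElem_range, List.getElem_take]
        have hi : i < pvFull.length := by
          simp only [List.length_map, List.length_range] at h1
          rw [pvFull_length]
          omega
        simp [List.getD, List.getElem?_eq_getElem hi]
    rw [htake]
    exact PySem.Chars.join_nil_singletons (pvFull.take m.toNat)
  · have h0 : m.toNat = 0 := by omega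
    rw [PySem.List.pyRange_one_eq_nil (by omega)]
    simp [h0]

-- ===== VERDICT (by name: the statement is the Claim_ definition above) =====
theorem generate_cyclic_pattern_spec : Claim_equal_generate_cyclic_pattern := by
  intro length _
  unfold Spec_generate_cyclic_pattern
  rw [a_eq, b_eq]
  by_cases h : length ≤ 20280
  · have : min length 20280 = length := by omega
    rw [this]
  · have h1 : (min length 20280).toNat = 20280 := by omega
    rw [h1,
      List.take_of_length_le (by rw [pvFull_length]; omega),
      List.take_of_length_le (by rw [pvFull_length])]
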